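-- pv_equiv track=rewrite | github.com/afmarsal/adventofcode | 2020/08/082.py | parse_and_run
-- ===== SOURCE A (Python) =====
-- NOT_FOUND = 99999999999
--
-- def parse_and_run(program):
--     pc = 0
--     accumulator = 0
--     seen_pcs = set()
--     while pc < len(program):
--         if pc in seen_pcs:
--             return NOT_FOUND
--
--         seen_pcs.add(pc)
--         op, arg = program[pc]
--         if op == "acc":
--             accumulator += int(arg)
--
--         elif op == "jmp":
--             pc += int(arg)
--             continue
--
--         pc += 1
--
--     return accumulator
-- ===== SOURCE B (Python) =====
-- NOT_FOUND = 99999999999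
--
--
-- def _step(program, pc, acc):
--     op, arg = program[pc]
--     if op == "acc":
--         return pc + 1, acc + int(arg)
--     if op == "jmp":
--         return pc + int(arg), acc
--     return pc + 1, acc
--
--
-- def parse_and_run(program):
--     # No seen-set: a run of more than len(program) steps must have repeated
--     # a program counter, hence loops forever.
--     pc, acc = 0, 0
--     for _ in range(len(program) + 1):
--         if pc >= len(program):
--             return acc
--         pc, acc = _step(program, pc, acc)
--     return NOT_FOUND
-- ===== Notes on version B (the rewrite author's own statement) =====
-- stated objective: simpler
-- what changed: Drops the seen-pcs set entirely: by pigeonhole a run of more than len(program) steps must repeat a pc and thus loop forever, so B simulates for at most len(program)+1 bounded steps (with the instruction decode factored into a helper) and returns the sentinel on budget exhaustion.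
-- outside the precondition, e.g. on parse_and_run([('jmp', '2'), ('acc', 'x')]): A returns 0, B returns 0; on parse_and_run([('jmp', '-1'), ('nop', '0')]): A returns 99999999999, B returns 99999999999
import Mathlib
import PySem

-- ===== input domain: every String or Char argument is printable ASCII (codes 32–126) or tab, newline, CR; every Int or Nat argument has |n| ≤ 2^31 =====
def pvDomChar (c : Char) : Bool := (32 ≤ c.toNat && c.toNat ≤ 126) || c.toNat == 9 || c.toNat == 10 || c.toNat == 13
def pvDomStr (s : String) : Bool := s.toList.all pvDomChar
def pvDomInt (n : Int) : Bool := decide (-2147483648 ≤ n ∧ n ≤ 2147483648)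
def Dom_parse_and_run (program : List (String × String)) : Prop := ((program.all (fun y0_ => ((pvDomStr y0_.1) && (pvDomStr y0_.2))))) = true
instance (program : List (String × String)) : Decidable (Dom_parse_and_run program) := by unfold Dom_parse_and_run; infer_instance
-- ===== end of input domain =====

-- B drops A's seen-pcs set: more than len(program) steps must repeat a pc, so B
-- simulates at most len(program)+1 steps and returns the sentinel on exhaustion (objective: simpler).

def NOT_FOUND : Int := 99999999999

-- ===== PORT A =====
-- literal port of A's while-loop; the fuel argument only makes the recursion total
-- (it never runs out where Pre_ holds: each iteration adds a fresh pc to seen).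
def runA (program : List (String × String)) : Nat → Int → Int → PySem.Set Int → Int
  | 0, _, _, _ => 0
  | fuel + 1, pc, accumulator, seen_pcs =>
    if pc < (program.length : Int) then
      if PySem.Set.contains seen_pcs pc then NOT_FOUND
      else
        let seen' := PySem.Set.add seen_pcs pc
        match PySem.List.pyGet? program pc with
        | none => 0  -- IndexError in Python; outside Pre_
        | some (op, arg) =>
          if op = "acc" then
            match PySem.Int.ofStr? arg with
            | none => 0  -- ValueError in Python; outside Pre_
            | some v => runA program fuel (pc + 1) (accumulator + v) seen'
          else if op = "jmp" then
            match PySem.Int.ofStr? arg with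
            | none => 0  -- ValueError in Python; outside Pre_
            | some v => runA program fuel (pc + v) accumulator seen'
          else runA program fuel (pc + 1) accumulator seen'
    else accumulator

def parse_and_run (program : List (String × String)) : Int :=
  runA program (program.length + 1) 0 0 PySem.Set.empty

-- ===== PORT B =====
-- one decode-and-execute step; none = Python raised (IndexError/ValueError), outside Pre_
def stepB (program : List (String × String)) (pc acc : Int) : Option (Int × Int) :=
  match PySem.List.pyGet? program pc with
  | none => none
  | some (op, arg) =>
    if op = "acc" then (PySem.Int.ofStr? arg).map (fun v => (pc + 1, acc + v))
    else if op = "jmp" then (PySem.Int.ofStr? arg).map (fun v => (pc + v, acc))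
    else some (pc + 1, acc)

-- the bounded for-loop of B: k = remaining iterations of range(len(program)+1)
def runB (program : List (String × String)) : Nat → Int → Int → Int
  | 0, _, _ => NOT_FOUND
  | k + 1, pc, acc =>
    if (program.length : Int) ≤ pc then acc
    else
      match stepB program pc acc with
      | none => 0  -- Python raised; outside Pre_
      | some (pc', acc') => runB program k pc' acc'

def parse_and_run_alt (program : List (String × String)) : Int :=
  runB program (program.length + 1) 0 0

-- ===== PRECONDITION & SPEC =====
-- Pre_ excludes programs carrying an acc/jmp instruction whose argument is not int-parseable
-- (reaching it raises ValueError; reachability is not closed-form, so all such args are excluded)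
-- and programs with a jmp whose target index is negative (reaching it makes Python wrap around
-- the end of the list or raise IndexError — an artefact of negative indexing).
def Pre_parse_and_run (program : List (String × String)) : Prop :=
  ∀ i : Fin program.length,
    (((program.get i).1 = "acc" ∨ (program.get i).1 = "jmp") →
        (PySem.Int.ofStr? (program.get i).2).isSome = true) ∧
    ((program.get i).1 = "jmp" →
        0 ≤ (i : Int) + ((PySem.Int.ofStr? (program.get i).2).getD 0))
instance (program : List (String × String)) : Decidable (Pre_parse_and_run program) := by
  unfold Pre_parse_and_run; infer_instance

def pvWitness_parse_and_run : (List (String × String)) := [("acc", "3"), ("jmp", "-1")]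

def Spec_parse_and_run (program : List (String × String)) (out : Int) : Prop := out = parse_and_run_alt program
instance (program : List (String × String)) (out : Int) : Decidable (Spec_parse_and_run program out) := by unfold Spec_parse_and_run; infer_instance

-- ===== CLAIM (what is proved, stated in full; the proofs are below) =====
def Claim_equal_parse_and_run : Prop := ∀ (program : List (String × String)), Dom_parse_and_run program → Pre_parse_and_run program → Spec_parse_and_run program (parse_and_run program)

-- ===== LEMMAS AND PROOFS =====

-- pc successor function: program-counter evolution is independent of the accumulator
def stepPc (program : List (String × String)) (pc : Int) : Option Int :=
  match stepB program pc 0 with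
  | none => none
  | some (pc', _) => some pc'

-- tail-style iteration of stepPc
def iterPc (program : List (String × String)) : Nat → Int → Option Int
  | 0, pc => some pc
  | k + 1, pc =>
    match iterPc program k pc with
    | none => none
    | some q => stepPc program q

def Reach (program : List (String × String)) : Int → Int → Prop :=
  Relation.TransGen (fun a b => stepPc program a = some b)

def NonHalt (program : List (String × String)) (pc : Int) : Prop :=
  ∀ k, iterPc program k pc ≠ none

theorem stepB_shift (program : List (String × String)) (pc acc : Int) :
    stepB program pc acc = (stepB program pc 0).map (fun p => (p.1, acc + p.2)) := by
  unfold stepB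
  rcases PySem.List.pyGet? program pc with _ | ⟨op, arg⟩
  · rfl
  · simp only
    split_ifs
    · rcases PySem.Int.ofStr? arg <;> simp
    · rcases PySem.Int.ofStr? arg <;> simp
    · simp

theorem stepPc_some {program : List (String × String)} {pc pc' : Int} (acc : Int)
    (h : stepPc program pc = some pc') : ∃ acc', stepB program pc acc = some (pc', acc') := by
  unfold stepPc at h
  rcases hs : stepB program pc 0 with _ | ⟨q, d⟩ <;> simp [hs] at h
  exact ⟨acc + d, by rw [stepB_shift, hs]; simp [h]⟩

theorem stepPc_lt {program : List (String × String)} {pc pc' : Int}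
    (h : stepPc program pc = some pc') : pc < (program.length : Int) ∧ -(program.length : Int) ≤ pc := by
  have hg : PySem.List.pyGet? program pc ≠ none := by
    intro hn
    simp [stepPc, stepB, hn] at h
  have hin : PySem.Raise.InRange program.length pc := by
    by_contra hc
    exact hg ((PySem.List.pyGet?_eq_none_iff program pc).mpr hc)
  unfold PySem.Raise.InRange at hin
  omega

theorem iterPc_head (program : List (String × String)) :
    ∀ (k : Nat) (pc : Int), iterPc program (k + 1) pc =
      match stepPc program pc with
      | none => none
      | some q => iterPc program k q := by
  intro k
  induction k with
  | zero =>
    intro pc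
    simp only [iterPc]
    rcases stepPc program pc <;> rfl
  | succ k ih =>
    intro pc
    show (match iterPc program (k + 1) pc with
          | none => none
          | some q => stepPc program q) = _
    rw [ih pc]
    rcases h : stepPc program pc with _ | q <;> simp [iterPc]

theorem cycle_nonHalt {program : List (String × String)} {pc : Int}
    (h : Reach program pc pc) : NonHalt program pc := by
  have key : ∀ k, ∃ q, iterPc program k pc = some q ∧ Reach program q pc := by
    intro k
    induction k with
    | zero => exact ⟨pc, rfl, h⟩
    | succ k ih =>
      obtain ⟨q, hq, hr⟩ := ih
      obtain ⟨r, h1, h2⟩ := Relation.TransGen.head'_iff.mp hr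
      exact ⟨r, by simp [iterPc, hq, h1], Relation.TransGen.trans_right h2 h⟩
  intro k
  obtain ⟨q, hq, _⟩ := key k
  simp [hq]

theorem runB_nonHalt {program : List (String × String)} :
    ∀ (fuel : Nat) (pc acc : Int), NonHalt program pc → runB program fuel pc acc = NOT_FOUND := by
  intro fuel
  induction fuel with
  | zero => intro pc acc _; rfl
  | succ k ih =>
    intro pc acc hnh
    have h1 := hnh 1
    simp only [iterPc] at h1
    rcases hs : stepPc program pc with _ | pc'
    · simp [hs] at h1
    · obtain ⟨hlt, _⟩ := stepPc_lt hs
      obtain ⟨acc', hstep⟩ := stepPc_some acc hs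
      have hnh' : NonHalt program pc' := by
        intro k hk
        have := hnh (k + 1)
        rw [iterPc_head, hs] at this
        exact this hk
      simp only [runB, hstep]
      rw [if_neg (by omega)]
      exact ih pc' acc' hnh'

-- under Pre_, a decoded in-range instruction parses and jumps land at nonnegative pcs
theorem pre_instr {program : List (String × String)} (hPre : Pre_parse_and_run program)
    {pc : Int} (h0 : 0 ≤ pc) (hlt : pc < (program.length : Int))
    {op arg : String} (hg : PySem.List.pyGet? program pc = some (op, arg)) :
    ((op = "acc" ∨ op = "jmp") → (PySem.Int.ofStr? arg).isSome = true) ∧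
    (op = "jmp" → 0 ≤ pc + ((PySem.Int.ofStr? arg).getD 0)) := by
  have hn : pc.toNat < program.length := by omega
  rw [PySem.List.pyGet?_eq_some_getElem program h0 hlt] at hg
  have hPi := hPre ⟨pc.toNat, hn⟩
  simp only [List.get_eq_getElem] at hPi
  rw [Option.some.inj hg] at hPi
  simp only at hPi
  refine ⟨hPi.1, fun hj => ?_⟩
  have h2 := hPi.2 hj
  omega

-- the main simulation lemma: A's loop with its seen-set and B's bounded loop agree in lockstep
theorem main_sim {program : List (String × String)} (hPre : Pre_parse_and_run program) :
    ∀ (fuel : Nat) (pc acc : Int) (seen : PySem.Set Int),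
      0 ≤ pc →
      seen.Nodup →
      (∀ q ∈ seen, 0 ≤ q ∧ q < (program.length : Int)) →
      fuel + seen.length = program.length + 1 →
      (∀ q ∈ seen, Reach program q pc) →
      runA program fuel pc acc seen = runB program fuel pc acc := by
  intro fuel
  induction fuel with
  | zero =>
    intro pc acc seen _ hnd hbnd hlen _
    exfalso
    have hsub : seen.toFinset ⊆ Finset.Ico (0 : Int) program.length := by
      intro q hq
      rw [List.mem_toFinset] at hq
      have := hbnd q hq
      simp [Finset.mem_Ico]; omega
    have hcard := Finset.card_le_card hsub
    rw [List.toFinset_card_of_nodup hnd, Int.card_Ico] at hcard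
    simp at hcard
    omega
  | succ fuel ih =>
    intro pc acc seen h0 hnd hbnd hlen hreach
    by_cases hend : pc < (program.length : Int)
    case neg =>
      simp only [runA, runB, if_neg hend, if_pos (by omega : (program.length : Int) ≤ pc)]
    case pos =>
      by_cases hmem : pc ∈ seen
      case pos =>
        -- A returns NOT_FOUND; B's budget cannot reach a halt: the run cycles
        have hcyc : Reach program pc pc := hreach pc hmem
        rw [runB_nonHalt _ _ _ (cycle_nonHalt hcyc)]
        simp only [runA, if_pos hend]
        rw [if_pos (by simpa [PySem.Set.contains] using hmem)]
      case neg =>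
        have hn : pc.toNat < program.length := by omega
        have hget : PySem.List.pyGet? program pc = some (program.get ⟨pc.toNat, hn⟩) := by
          rw [PySem.List.pyGet?_eq_some_getElem program h0 hend]
          simp [List.get_eq_getElem]
        rcases hi : program.get ⟨pc.toNat, hn⟩ with ⟨op, arg⟩
        rw [hi] at hget
        have hpre := pre_instr hPre h0 hend hget
        have hadd : PySem.Set.add seen pc = seen ++ [pc] := by
          simp [PySem.Set.add, PySem.Set.contains]
          intro h; exact absurd h hmem
        have hnd' : (seen ++ [pc]).Nodup := by
          simp [List.nodup_append, hnd]
          exact fun a ha h => hmem (h ▸ ha)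
        have hbnd' : ∀ q ∈ seen ++ [pc], 0 ≤ q ∧ q < (program.length : Int) := by
          intro q hq
          rcases List.mem_append.mp hq with h | h
          · exact hbnd q h
          · simp at h; omega
        have hlen' : fuel + (seen ++ [pc]).length = program.length + 1 := by
          simp; omega
        -- one decoded step: both sides recurse on the same (pc', acc')
        have step_common : ∀ pc' acc', stepPc program pc = some pc' → 0 ≤ pc' →
            runA program fuel pc' acc' (seen ++ [pc]) = runB program fuel pc' acc' := by
          intro pc' acc' hs h0'
          apply ih pc' acc' (seen ++ [pc]) h0' hnd' hbnd' hlen'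
          intro q hq
          rcases List.mem_append.mp hq with h | h
          · exact Relation.TransGen.tail (hreach q h) hs
          · simp at h; subst h; exact Relation.TransGen.single hs
        simp only [runA, runB, if_pos hend, if_neg (by omega : ¬ (program.length : Int) ≤ pc)]
        rw [if_neg (by simpa [PySem.Set.contains] using hmem)]
        rw [hadd.symm] at *
        simp only [stepB, hget]
        by_cases hacc : op = "acc"
        case pos =>
          rcases hp : PySem.Int.ofStr? arg with _ | v
          · exact absurd (hpre.1 (Or.inl hacc)) (by simp [hp])
          · have hs : stepPc program pc = some (pc + 1) := by
              simp [stepPc, stepB, hget, hacc, hp]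
            simp only [if_pos hacc, Option.map_some]
            exact step_common (pc + 1) (acc + v) hs (by omega)
        case neg =>
          by_cases hjmp : op = "jmp"
          case pos =>
            rcases hp : PySem.Int.ofStr? arg with _ | v
            · exact absurd (hpre.1 (Or.inr hjmp)) (by simp [hp])
            · have hs : stepPc program pc = some (pc + v) := by
                simp [stepPc, stepB, hget, hjmp, hp]
              have h0' : 0 ≤ pc + v := by
                have := hpre.2 hjmp
                simp [hp] at this
                omega
              simp only [if_neg hacc, if_pos hjmp, Option.map_some]
              exact step_common (pc + v) acc hs h0'
          case neg =>
            have hs : stepPc program pc = some (pc + 1) := by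
              simp [stepPc, stepB, hget, hacc, hjmp]
            simp only [if_neg hacc, if_neg hjmp]
            exact step_common (pc + 1) acc hs (by omega)

-- ===== VERDICT (by name: the statement is the Claim_ definition above) =====
theorem parse_and_run_spec : Claim_equal_parse_and_run := by
  intro program _ hPre
  unfold Spec_parse_and_run parse_and_run parse_and_run_alt
  exact main_sim hPre (program.length + 1) 0 0 PySem.Set.empty (by omega)
    List.nodup_nil (by simp [PySem.Set.empty]) (by simp [PySem.Set.empty])
    (by simp [PySem.Set.empty])
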